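-- pv_equiv track=rewrite | github.com/sebug/grill-automator | solve.py | get_last_white_line
-- ===== SOURCE A (Python) =====
-- def is_white_pixel(pixel):
--     return pixel[0] == 255 and pixel[1] == 255 and pixel[2] == 255
--
-- def is_white_line(line):
--     for pixel in line[5:-5]:
--         if not is_white_pixel(pixel):
--             return False
--     return True
--
-- def get_last_white_line(pixel_array):
--     y = -1
--     last_line = -1
--     previous_line = pixel_array[0]
--     for line in pixel_array:
--         y += 1
--         if is_white_line(line) and is_white_line(previous_line):
--             last_line = y
--         previous_line = line
--     return last_line
-- ===== SOURCE B (Python) =====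
-- def is_white_line(line):
--     return all(pixel[:3] == [255, 255, 255] for pixel in line[5:-5])
--
-- def get_last_white_line(pixel_array):
--     whites = [is_white_line(line) for line in pixel_array]
--     for y in range(len(whites) - 1, 0, -1):
--         if whites[y] and whites[y - 1]:
--             return y
--     return 0 if whites[0] else -1
-- ===== Notes on version B (the rewrite author's own statement) =====
-- stated objective: alternative
-- what changed: B precomputes a per-line whiteness table in one pass and then scans index pairs backwards with early return, instead of A's forward fold that carries the previous line and re-tests its whiteness; B's pixel test compares pixel[:3] to [255,255,255] instead of three short-circuited indexings.
import Mathlib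
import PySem

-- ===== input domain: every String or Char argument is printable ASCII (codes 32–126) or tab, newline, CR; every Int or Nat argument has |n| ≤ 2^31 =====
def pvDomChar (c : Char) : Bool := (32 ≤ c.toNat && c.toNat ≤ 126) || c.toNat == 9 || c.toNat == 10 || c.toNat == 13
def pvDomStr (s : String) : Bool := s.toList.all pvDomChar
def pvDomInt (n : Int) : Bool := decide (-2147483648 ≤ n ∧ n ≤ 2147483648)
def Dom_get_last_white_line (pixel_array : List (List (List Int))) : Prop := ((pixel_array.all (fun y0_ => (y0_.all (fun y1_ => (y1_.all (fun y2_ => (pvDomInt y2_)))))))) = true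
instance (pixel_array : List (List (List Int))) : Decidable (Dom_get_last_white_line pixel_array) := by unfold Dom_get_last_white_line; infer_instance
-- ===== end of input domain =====

-- B changes the decomposition: one pass building a per-line whiteness table, then a backward
-- early-return scan over index pairs (objective: alternative, not measured faster).

-- ===== PORT A =====
-- pixel[0]==255 and pixel[1]==255 and pixel[2]==255; getD 0 stands in only where Python raises IndexError (excluded by Pre_)
def pvIsWhitePixel (p : List Int) : Bool :=
  ((PySem.List.pyGet? p 0).getD 0 == 255) && ((PySem.List.pyGet? p 1).getD 0 == 255) &&
    ((PySem.List.pyGet? p 2).getD 0 == 255)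

-- the for/early-return loop over line[5:-5]
def pvIsWhiteLine (line : List (List Int)) : Bool :=
  (PySem.List.slice line (some 5) (some (-5))).all pvIsWhitePixel

def pvStepA (st : Int × Int × List (List Int)) (line : List (List Int)) :
    Int × Int × List (List Int) :=
  let y := st.1 + 1
  let last := if pvIsWhiteLine line && pvIsWhiteLine st.2.2 then y else st.2.1
  (y, last, line)

def get_last_white_line (pixel_array : List (List (List Int))) : Int :=
  match pixel_array with
  | [] => -1  -- Python raises IndexError on pixel_array[0] here; excluded by Pre_
  | first :: _ => (pixel_array.foldl pvStepA (-1, -1, first)).2.1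

-- ===== PORT B =====
def pvIsWhiteLineAlt (line : List (List Int)) : Bool :=
  (PySem.List.slice line (some 5) (some (-5))).all
    (fun p => PySem.List.slice p none (some 3) == [255, 255, 255])

-- the for y in range(len(whites)-1, 0, -1) early-return loop, then the whites[0] fallback
def pvScanRev (whites : List Bool) : Nat → Int
  | 0 => if whites.getD 0 false then 0 else -1  -- Python raises IndexError on whites[0] if whites = []; excluded by Pre_
  | Nat.succ k =>
      if whites.getD (k + 1) false && whites.getD k false then ((k : Int) + 1)
      else pvScanRev whites k

def get_last_white_line_alt (pixel_array : List (List (List Int))) : Int :=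
  let whites := pixel_array.map pvIsWhiteLineAlt
  pvScanRev whites (whites.length - 1)

-- ===== PRECONDITION & SPEC =====
-- pixel is fully white (all three channel reads succeed and equal 255)
def pvWhiteB (p : List Int) : Bool :=
  (3 ≤ p.length) && (p.getD 0 0 == 255) && (p.getD 1 0 == 255) && (p.getD 2 0 == 255)
-- Python's is_white_pixel raises IndexError on this pixel (short-circuit taken into account)
def pvRaisesB (p : List Int) : Bool :=
  (p == []) || ((p.getD 0 0 == 255) && (decide (p.length < 2) ||
    ((p.getD 1 0 == 255) && decide (p.length < 3))))
-- Python's is_white_line raises on this line: some inspected pixel of line[5:-5] raises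
-- before any non-white pixel is reached
def pvLineRaisesB (line : List (List Int)) : Bool :=
  let S := PySem.List.slice line (some 5) (some (-5))
  (List.range S.length).any (fun i =>
    pvRaisesB (S.getD i []) && (List.range i).all (fun j => pvWhiteB (S.getD j [])))

-- Pre_ excludes exactly the inputs where Python A raises IndexError: the empty list and
-- arrays containing a line on which is_white_line raises.
def Pre_get_last_white_line (pixel_array : List (List (List Int))) : Prop :=
  pixel_array ≠ [] ∧ ∀ line ∈ pixel_array, pvLineRaisesB line = false
instance (pixel_array : List (List (List Int))) : Decidable (Pre_get_last_white_line pixel_array) := by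
  unfold Pre_get_last_white_line; infer_instance

def pvWitness_get_last_white_line : List (List (List Int)) := [[]]

def Spec_get_last_white_line (pixel_array : List (List (List Int))) (out : Int) : Prop := out = get_last_white_line_alt pixel_array
instance (pixel_array : List (List (List Int))) (out : Int) : Decidable (Spec_get_last_white_line pixel_array out) := by unfold Spec_get_last_white_line; infer_instance

-- ===== CLAIM (what is proved, stated in full; the proofs are below) =====
def Claim_equal_get_last_white_line : Prop := ∀ (pixel_array : List (List (List Int))), Dom_get_last_white_line pixel_array → Pre_get_last_white_line pixel_array → Spec_get_last_white_line pixel_array (get_last_white_line pixel_array)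

-- ===== LEMMAS AND PROOFS =====

-- sequential simulation of is_white_line's raise behaviour, for the induction
def pvScanB : List (List Int) → Bool
  | [] => false
  | p :: S => pvRaisesB p || (pvWhiteB p && pvScanB S)

-- A's loop body with the carried previous line replaced by its whiteness bit
def pvStepW (st : Int × Int × Bool) (w : Bool) : Int × Int × Bool :=
  (st.1 + 1, if w && st.2.2 then st.1 + 1 else st.2.1, w)

lemma pvPixel_eq (p : List Int) (h : pvRaisesB p = false) :
    pvIsWhitePixel p = (PySem.List.slice p none (some 3) == [255, 255, 255]) := by
  have hs : PySem.List.slice p none (some 3) = p.take 3 := by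
    simp [PySem.List.slice, PySem.List.clampIdx]
  rw [hs]
  rcases p with _ | ⟨a, _ | ⟨b, _ | ⟨c, r⟩⟩⟩
  · simp [pvRaisesB] at h
  · simp [pvRaisesB] at h
    simp [pvIsWhitePixel, PySem.List.pyGet?, PySem.List.pyIdx?, h]
  · simp [pvRaisesB] at h
    by_cases ha : a = 255
    · simp [pvIsWhitePixel, PySem.List.pyGet?, PySem.List.pyIdx?, ha, h ha]
    · simp [pvIsWhitePixel, PySem.List.pyGet?, PySem.List.pyIdx?, ha]
  · by_cases ha : a = 255 <;> by_cases hb : b = 255 <;> by_cases hc : c = 255 <;>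
      simp [pvIsWhitePixel, PySem.List.pyGet?, PySem.List.pyIdx?, ha, hb, hc, Bool.and_assoc, show (0:Int) ≤ (r.length:Int)+1+1 from by positivity, show (0:Int) ≤ (r.length:Int)+1 from by positivity, show (2:Int) ≤ (r.length:Int)+1+1 from by omega]

lemma pvPixel_white (p : List Int) (h : pvRaisesB p = false) (hw : pvIsWhitePixel p = true) :
    pvWhiteB p = true := by
  rcases p with _ | ⟨a, _ | ⟨b, _ | ⟨c, r⟩⟩⟩
  · simp [pvRaisesB] at h
  · simp [pvIsWhitePixel, PySem.List.pyGet?, PySem.List.pyIdx?] at hw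
  · simp [pvIsWhitePixel, PySem.List.pyGet?, PySem.List.pyIdx?] at hw
  · simp [pvIsWhitePixel, PySem.List.pyGet?, PySem.List.pyIdx?, show (0:Int) ≤ (r.length:Int)+1+1 from by positivity, show (0:Int) ≤ (r.length:Int)+1 from by positivity, show (2:Int) ≤ (r.length:Int)+1+1 from by omega] at hw
    simp [pvWhiteB, hw]

lemma pvRangeAny_eq_scanB (S : List (List Int)) :
    ((List.range S.length).any (fun i =>
      pvRaisesB (S.getD i []) && (List.range i).all (fun j => pvWhiteB (S.getD j [])))) =
    pvScanB S := by
  induction S with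
  | nil => simp [pvScanB]
  | cons p S ih =>
      simp only [List.length_cons, List.range_succ_eq_map, List.any_cons, List.any_map,
        Function.comp_def, List.all_cons, List.all_map, List.getD_cons_zero, List.getD_cons_succ,
        List.range_zero, List.all_nil, Bool.and_true, pvScanB]
      by_cases hp : pvWhiteB p = true
      · simp [hp, ← ih, Bool.and_left_comm]
      · simp only [Bool.not_eq_true] at hp
        simp [hp, pvScanB]

lemma pvAll_eq (S : List (List Int)) (h : pvScanB S = false) :
    S.all pvIsWhitePixel = S.all (fun p => PySem.List.slice p none (some 3) == [255, 255, 255]) := by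
  induction S with
  | nil => rfl
  | cons p S ih =>
      simp only [pvScanB, Bool.or_eq_false_iff, Bool.and_eq_false_iff] at h
      obtain ⟨hr, htail⟩ := h
      simp only [List.all_cons, pvPixel_eq p hr]
      by_cases hw : (PySem.List.slice p none (some 3) == [255, 255, 255]) = true
      · have hwb : pvWhiteB p = true := pvPixel_white p hr (by rw [pvPixel_eq p hr]; exact hw)
        rcases htail with h1 | h2
        · rw [hwb] at h1; exact absurd h1 (by simp)
        · rw [ih h2]
      · simp only [Bool.not_eq_true] at hw; simp [hw]

lemma pvLine_eq (L : List (List Int)) (h : pvLineRaisesB L = false) :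
    pvIsWhiteLine L = pvIsWhiteLineAlt L := by
  unfold pvIsWhiteLine pvIsWhiteLineAlt
  apply pvAll_eq
  rw [← pvRangeAny_eq_scanB]
  simpa [pvLineRaisesB] using h

lemma pvFoldW_fst (ws : List Bool) : ∀ st : Int × Int × Bool,
    (ws.foldl pvStepW st).1 = st.1 + ws.length := by
  induction ws with
  | nil => intro st; simp
  | cons w ws ih => intro st; simp [pvStepW, ih]; ring

lemma pvFoldW_prev (ws : List Bool) : ∀ st : Int × Int × Bool,
    (ws.foldl pvStepW st).2.2 = ws.getLast?.getD st.2.2 := by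
  induction ws with
  | nil => intro st; simp
  | cons w ws ih =>
      intro st
      cases ws with
      | nil => simp [pvStepW]
      | cons b t =>
          rw [List.foldl_cons, ih]
          cases hl : (b :: t).getLast? with
          | none => exact absurd hl (by simp)
          | some x => simp [List.getLast?_cons_cons, hl]

lemma pvScanRev_append (L : List Bool) (w : Bool) : ∀ k, k < L.length →
    pvScanRev (L ++ [w]) k = pvScanRev L k := by
  intro k
  induction k with
  | zero =>
      intro h
      have h1 : (L ++ [w]).getD 0 false = L.getD 0 false := by
        rw [List.getD_eq_getElem?_getD, List.getD_eq_getElem?_getD, List.getElem?_append_left h]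
      simp only [pvScanRev, h1]
  | succ k ih =>
      intro h
      simp [pvScanRev, List.getD, List.getElem?_append_left h,
        List.getElem?_append_left (show k < L.length by omega), ih (by omega)]

lemma pvMain (w0 : Bool) (ws : List Bool) :
    ((w0 :: ws).foldl pvStepW (-1, -1, w0)).2.1 = pvScanRev (w0 :: ws) ws.length := by
  induction ws using List.reverseRecOn with
  | nil => simp [pvStepW, pvScanRev, Bool.and_self]
  | append_singleton ws w ih =>
      rw [show w0 :: (ws ++ [w]) = (w0 :: ws) ++ [w] from rfl, List.foldl_append]
      have hfst := pvFoldW_fst (w0 :: ws) (-1, -1, w0)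
      have hprev := pvFoldW_prev (w0 :: ws) (-1, -1, w0)
      have hlast : ((w0 :: ws) : List Bool).getLast?.getD w0 = (w0 :: ws).getD ws.length false := by
        rw [List.getLast?_eq_getElem?, List.getD_eq_getElem?_getD,
          show (w0 :: ws).length - 1 = ws.length from by simp,
          List.getElem?_eq_getElem (by simp)]
        rfl
      set st := List.foldl pvStepW (-1, -1, w0) (w0 :: ws) with hst
      have hA : ((w0 :: ws) ++ [w]).getD (ws.length + 1) false = w := by
        rw [List.getD_eq_getElem?_getD,
          show ws.length + 1 = ((w0 :: ws) : List Bool).length from by simp,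
          List.getElem?_append_right (le_refl _)]
        simp
      have hB : ((w0 :: ws) ++ [w]).getD ws.length false = (w0 :: ws).getD ws.length false := by
        rw [List.getD_eq_getElem?_getD, List.getD_eq_getElem?_getD,
          List.getElem?_append_left (by simp)]
      have hscan : pvScanRev ((w0 :: ws) ++ [w]) (ws.length + 1)
          = if ((w0 :: ws) ++ [w]).getD (ws.length + 1) false &&
                ((w0 :: ws) ++ [w]).getD ws.length false then ((ws.length : Int) + 1)
            else pvScanRev ((w0 :: ws) ++ [w]) ws.length := rfl
      rw [show (ws ++ [w]).length = ws.length + 1 from by simp, hscan, hA, hB,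
        pvScanRev_append _ _ _ (by simp), ← hlast, ← hprev]
      by_cases hw : (w && st.2.2) = true
      · simp [pvStepW, hw, hfst]
      · simp only [Bool.not_eq_true] at hw
        simp [pvStepW, hw, ih]

lemma pvFoldA_map (arr : List (List (List Int))) : ∀ (y last : Int) (prev : List (List Int)),
    (arr.foldl pvStepA (y, last, prev)).2.1 =
    ((arr.map pvIsWhiteLine).foldl pvStepW (y, last, pvIsWhiteLine prev)).2.1 := by
  induction arr with
  | nil => intros; rfl
  | cons L arr ih => intro y last prev; simp [pvStepA, pvStepW, ih]

-- ===== VERDICT (by name: the statement is the Claim_ definition above) =====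
theorem get_last_white_line_spec : Claim_equal_get_last_white_line := by
  intro arr _hdom hpre
  unfold Pre_get_last_white_line at hpre
  obtain ⟨hne, hall⟩ := hpre
  unfold Spec_get_last_white_line
  cases arr with
  | nil => exact absurd rfl hne
  | cons first rest =>
      have hmap : (first :: rest).map pvIsWhiteLine = (first :: rest).map pvIsWhiteLineAlt :=
        List.map_congr_left (fun L hL => pvLine_eq L (hall L hL))
      show (((first :: rest).foldl pvStepA (-1, -1, first)).2.1 : Int) = _
      rw [pvFoldA_map, List.map_cons, pvMain, ← List.map_cons, hmap]
      unfold get_last_white_line_alt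
      simp
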